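-- pv_equiv track=rewrite | github.com/borisgusev/bwt_fmindex | bwt.py | cumul_count
-- ===== SOURCE A (Python) =====
-- def cumul_count(bwt_string):
--     '''
--     returns a list of ranks and a C_table.
--     for any valid index, ranks[index] is the number of bwt_string[index] characters in bwt_string[0:index]
--     '''
--     counts = {}
--     ranks = []
--     for char in bwt_string:
--         if char not in counts:
--             counts[char] = 0
--         ranks.append(counts[char])
--         counts[char] += 1
--     return ranks, generate_C_table(counts)
--
-- def generate_C_table(counts):
--     '''
--     takes total counts for each chracter and returns a mapping of each character to the sum of counts of lexicographically smaller characters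
--     '''
--     c_table = {}
--     running_sum = 0
--     for char, count in sorted(counts.items()):
--         c_table[char] = running_sum
--         running_sum += count
--     return c_table
-- ===== SOURCE B (Python) =====
-- def cumul_count(bwt_string):
--     '''
--     Group-then-scatter: index each character's positions in one pass, scatter
--     per-group ranks into a preallocated list, then prefix-sum the group sizes
--     in sorted key order for the C-table.
--     '''
--     positions = {}
--     for i, char in enumerate(bwt_string):
--         positions.setdefault(char, []).append(i)
--     ranks = [0] * len(bwt_string)
--     for pos_list in positions.values():
--         for rank, i in enumerate(pos_list):
--             ranks[i] = rank
--     c_table = {}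
--     running_sum = 0
--     for char in sorted(positions):
--         c_table[char] = running_sum
--         running_sum += len(positions[char])
--     return ranks, c_table
-- ===== Notes on version B (the rewrite author's own statement) =====
-- stated objective: alternative
-- what changed: Replaces the single running-counts scan with a group-then-scatter decomposition: one pass builds a char -> position-list index, ranks are scattered into a preallocated array per group, and the C-table is a prefix sum of group sizes over the sorted keys.
import Mathlib
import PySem

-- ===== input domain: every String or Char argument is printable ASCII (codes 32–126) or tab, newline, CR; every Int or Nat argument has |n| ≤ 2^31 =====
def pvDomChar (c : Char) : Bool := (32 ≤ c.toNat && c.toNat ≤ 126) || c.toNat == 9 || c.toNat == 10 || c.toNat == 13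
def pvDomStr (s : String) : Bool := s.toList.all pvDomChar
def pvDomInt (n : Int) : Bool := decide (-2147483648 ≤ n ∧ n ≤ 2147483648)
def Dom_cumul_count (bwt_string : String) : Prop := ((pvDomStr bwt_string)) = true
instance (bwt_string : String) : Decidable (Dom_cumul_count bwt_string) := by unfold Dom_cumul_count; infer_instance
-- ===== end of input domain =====

-- B re-implements the running-count scan as a group-then-scatter pass (same cost); return values proved equal.

-- ===== PORT A =====
-- loop body of A's counting scan ('if char not in counts: … ; ranks.append(counts[char]); counts[char] += 1')
def cumulStepA (st : PySem.Dict String Int × List Int) (ch : String) :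
    PySem.Dict String Int × List Int :=
  let counts := if st.1.contains ch then st.1 else st.1.insert ch 0
  (counts.insert ch (counts.getD ch 0 + 1), st.2 ++ [counts.getD ch 0])

-- helper generate_C_table of A ('for char, count in sorted(counts.items()): …')
def generate_C_table (counts : PySem.Dict String Int) : PySem.Dict String Int :=
  ((PySem.List.sorted2 counts.items Prod.fst Prod.snd false).foldl
    (fun (st : PySem.Dict String Int × Int) p => (st.1.insert p.1 st.2, st.2 + p.2))
    (PySem.Dict.empty, 0)).1

def cumul_count (bwt_string : String) : List Int × (List (String × Int)) :=
  let chars := bwt_string.toList.map (fun c => String.ofList [c])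
  let st := chars.foldl cumulStepA (PySem.Dict.empty, [])
  (st.2, (generate_C_table st.1).items)

-- ===== PORT B =====
def cumul_count_alt (bwt_string : String) : List Int × (List (String × Int)) :=
  let chars := bwt_string.toList.map (fun c => String.ofList [c])
  -- positions.setdefault(char, []).append(i)
  let positions := (PySem.List.enumerate chars 0).foldl
      (fun (d : PySem.Dict String (List Int)) p => d.modify p.2 [] (fun l => l ++ [p.1]))
      PySem.Dict.empty
  -- scatter per-group ranks into ranks = [0] * len(bwt_string)
  let ranks := positions.values.foldl
      (fun (a : List Int) pos_list =>
        (PySem.List.enumerate pos_list 0).foldl (fun a q => PySem.List.pySetD a q.2 q.1) a)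
      (PySem.List.pyRepeat [(0 : Int)] (PySem.Str.len bwt_string))
  -- prefix-sum of group sizes over sorted(positions)
  let ct := (PySem.List.sorted positions.keys (fun k => k) false).foldl
      (fun (st : PySem.Dict String Int × Int) ch =>
        (st.1.insert ch st.2, st.2 + ((positions.getD ch []).length : Int)))
      (PySem.Dict.empty, 0)
  (ranks, ct.1.items)

-- ===== PRECONDITION & SPEC =====
def Spec_cumul_count (bwt_string : String) (out : List Int × (List (String × Int))) : Prop := out = cumul_count_alt bwt_string
instance (bwt_string : String) (out : List Int × (List (String × Int))) : Decidable (Spec_cumul_count bwt_string out) := by unfold Spec_cumul_count; infer_instance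

-- ===== CLAIM (what is proved, stated in full; the proofs are below) =====
def Claim_equal_cumul_count : Prop := ∀ (bwt_string : String), Dom_cumul_count bwt_string → Spec_cumul_count bwt_string (cumul_count bwt_string)

-- ===== LEMMAS AND PROOFS =====

-- dict-only part of A's counting step
def cumulStepD (d : PySem.Dict String Int) (ch : String) : PySem.Dict String Int :=
  let counts := if d.contains ch then d else d.insert ch 0
  counts.insert ch (counts.getD ch 0 + 1)

-- ranks produced by A's scan of l after already having seen pre
def ranksA (pre l : List String) : List Int :=
  match l with
  | [] => []
  | c :: t => ((pre.count c : Int)) :: ranksA (pre ++ [c]) t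

-- the C-table as a list: keys of K paired with the running sum of v
def ctabL (K : List String) (v : String → Int) (s : Int) : List (String × Int) :=
  match K with
  | [] => []
  | c :: t => (c, s) :: ctabL t v (s + v c)

-- the intended value of ranks[k]
def specv (cs : List String) (k : Nat) : Int := ((cs.take k).count (cs.getD k "") : Int)

-- A-SIDE -------------------------------------------------------------

theorem getD_stepD (d : PySem.Dict String Int) (ch c : String) :
    (cumulStepD d ch).getD c 0 = d.getD c 0 + (if c = ch then 1 else 0) := by
  unfold cumulStepD
  by_cases hc : d.contains ch = true
  · simp only [hc, if_true, PySem.Dict.getD_insert]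
    by_cases h : c = ch
    · subst h; simp
    · simp [h]
  · simp only [Bool.not_eq_true] at hc
    have h0 : d.getD ch 0 = 0 := PySem.Dict.getD_of_not_contains d 0 hc
    simp only [hc, Bool.false_eq_true, if_false, PySem.Dict.getD_insert]
    by_cases h : c = ch
    · subst h; simp [h0]
    · simp [h]

theorem keys_stepD (d : PySem.Dict String Int) (ch : String) :
    (cumulStepD d ch).keys = PySem.Set.add d.keys ch := by
  unfold cumulStepD
  by_cases hc : d.contains ch = true
  · have hmem : ch ∈ d.keys := (PySem.Dict.contains_iff_mem_keys d ch).mp hc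
    simp only [hc, if_true]
    rw [PySem.Dict.keys_insert_of_contains _ _ hc]
    simp [PySem.Set.add, hmem]
  · simp only [Bool.not_eq_true] at hc
    have hmem : ch ∉ d.keys := fun h => by
      rw [(PySem.Dict.contains_iff_mem_keys d ch).mpr h] at hc; cases hc
    simp only [hc, Bool.false_eq_true, if_false]
    rw [PySem.Dict.keys_insert_of_contains _ _ (PySem.Dict.contains_insert_self d ch 0),
        PySem.Dict.keys_insert_of_not_contains _ _ hc]
    simp [PySem.Set.add, hmem]

theorem afold (l : List String) : ∀ (pre : List String) (d : PySem.Dict String Int) (r : List Int),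
    (∀ c, d.getD c 0 = (pre.count c : Int)) →
    l.foldl cumulStepA (d, r) = (l.foldl cumulStepD d, r ++ ranksA pre l) := by
  induction l with
  | nil => intro pre d r hg; simp [ranksA]
  | cons c t ih =>
    intro pre d r hg
    have hcount : (if d.contains c then d else d.insert c 0).getD c 0 = (pre.count c : Int) := by
      by_cases hc : d.contains c = true
      · simpa [hc] using hg c
      · simp only [Bool.not_eq_true] at hc
        have h0 : d.getD c 0 = 0 := PySem.Dict.getD_of_not_contains d 0 hc
        have h1 := hg c
        rw [h0] at h1
        simp [hc, PySem.Dict.getD_insert, ← h1]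
    have hstep : cumulStepA (d, r) c = (cumulStepD d c, r ++ [(pre.count c : Int)]) := by
      simp only [cumulStepA, cumulStepD, hcount]
    have hg' : ∀ c', (cumulStepD d c).getD c' 0 = (((pre ++ [c]).count c' : Nat) : Int) := by
      intro c'
      rw [getD_stepD, hg c', List.count_append]
      by_cases h : c' = c
      · subst h; simp
      · have hb : ¬ (c == c') = true := by simpa using fun hh => h hh.symm
        simp [List.count_singleton, h, hb]
    rw [List.foldl_cons, hstep, ih (pre ++ [c]) _ _ hg']
    simp [ranksA]

theorem dfold_keys (l : List String) : ∀ (d : PySem.Dict String Int),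
    (l.foldl cumulStepD d).keys = PySem.Set.update d.keys l := by
  induction l with
  | nil => intro d; simp [PySem.Set.update]
  | cons c t ih =>
    intro d
    rw [List.foldl_cons, ih, keys_stepD]
    simp [PySem.Set.update]

theorem dfold_getD (l : List String) : ∀ (d : PySem.Dict String Int) (c : String),
    (l.foldl cumulStepD d).getD c 0 = d.getD c 0 + (l.count c : Int) := by
  induction l with
  | nil => intro d c; simp
  | cons x t ih =>
    intro d c
    rw [List.foldl_cons, ih, getD_stepD, List.count_cons]
    by_cases h : c = x
    · subst h; simp; omega
    · have hb : ¬ (x == c) = true := by simpa using fun hh => h hh.symm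
      simp only [hb, Bool.false_eq_true, if_false, h]
      push_cast
      omega

theorem ranksA_length (l : List String) : ∀ pre, (ranksA pre l).length = l.length := by
  induction l with
  | nil => intro pre; simp [ranksA]
  | cons c t ih => intro pre; simp [ranksA, ih]

theorem ranksA_getElem (l : List String) : ∀ (pre : List String) (j : Nat) (hj : j < l.length),
    (ranksA pre l)[j]'(by rw [ranksA_length]; exact hj) =
      (((pre ++ l).take (pre.length + j)).count ((pre ++ l).getD (pre.length + j) "") : Int) := by
  induction l with
  | nil => intro pre j hj; simp at hj
  | cons c t ih =>
    intro pre j hj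
    match j with
    | 0 =>
      have htake : (pre ++ c :: t).take (pre.length + 0) = pre := by
        simpa using List.take_left (l₂ := c :: t) (l₁ := pre)
      have hget : (pre ++ c :: t).getD (pre.length + 0) "" = c := by
        rw [List.getD_eq_getElem?_getD]
        simp
      simp [ranksA, htake, hget]
    | j + 1 =>
      have hj' : j < t.length := by simpa using hj
      have hmain := ih (pre ++ [c]) j hj'
      have hL : (pre ++ [c]) ++ t = pre ++ c :: t := by simp
      have hlen : (pre ++ [c]).length = pre.length + 1 := by simp
      rw [hL, hlen] at hmain
      have harith : pre.length + 1 + j = pre.length + (j + 1) := by omega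
      rw [harith] at hmain
      simpa [ranksA] using hmain

-- sorted2 on pairs with distinct first components is sorting by the first component
theorem insertBy_congr {α : Type} (f g : α → α → Bool) (x : α) (ys : List α)
    (h : ∀ y ∈ ys, f x y = g x y) :
    PySem.List.insertBy f x ys = PySem.List.insertBy g x ys := by
  induction ys with
  | nil => simp [PySem.List.insertBy]
  | cons y t ih =>
    have hy : f x y = g x y := h y (by simp)
    simp only [PySem.List.insertBy, hy]
    by_cases hg : g x y = true
    · simp [hg]
    · simp only [Bool.not_eq_true] at hg
      simp [hg, ih (fun z hz => h z (by simp [hz]))]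

theorem foldl_insertBy_congr {α : Type} (f g : α → α → Bool) (l : List α) : ∀ (acc : List α),
    (∀ a b : α, (a ∈ l ∨ a ∈ acc) → (b ∈ l ∨ b ∈ acc) → f a b = g a b) →
    l.foldl (fun acc x => PySem.List.insertBy f x acc) acc
      = l.foldl (fun acc x => PySem.List.insertBy g x acc) acc := by
  induction l with
  | nil => intro acc h; simp
  | cons x t ih =>
    intro acc h
    rw [List.foldl_cons, List.foldl_cons]
    rw [insertBy_congr f g x acc (fun y hy => h x y (Or.inl (by simp)) (Or.inr hy))]
    exact ih _ (fun a b ha hb => by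
      apply h a b
      · rcases ha with ha | ha
        · exact Or.inl (by simp [ha])
        · rw [PySem.List.mem_insertBy] at ha
          rcases ha with h1 | h1
          · exact Or.inl (by simp [h1])
          · exact Or.inr h1
      · rcases hb with hb | hb
        · exact Or.inl (by simp [hb])
        · rw [PySem.List.mem_insertBy] at hb
          rcases hb with h1 | h1
          · exact Or.inl (by simp [h1])
          · exact Or.inr h1)

theorem sorted2_eq_sorted_fst (xs : List (String × Int))
    (h : (xs.map Prod.fst).Nodup) :
    PySem.List.sorted2 xs Prod.fst Prod.snd false = PySem.List.sorted xs Prod.fst false := by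
  have hpw : xs.Pairwise (fun a b => a.1 ≠ b.1) := by
    have h' : (List.map Prod.fst xs).Pairwise (· ≠ ·) := h
    rwa [List.pairwise_map] at h'
  have hinj : ∀ a ∈ xs, ∀ b ∈ xs, a.1 = b.1 → a = b := by
    intro a ha b hb hab
    by_contra hne
    exact (List.Pairwise.forall (fun x y hxy h2 => hxy h2.symm) hpw ha hb hne) hab
  rw [PySem.List.sorted_eq_foldl_insertBy]
  show xs.foldl (fun acc x => PySem.List.insertBy _ x acc) [] = _
  apply foldl_insertBy_congr
  intro a b ha hb
  have ha : a ∈ xs := by rcases ha with h1 | h1; exact h1; simp at h1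
  have hb : b ∈ xs := by rcases hb with h1 | h1; exact h1; simp at h1
  by_cases hab : a = b
  · subst hab; simp [lt_irrefl]
  · have h1 : a.1 ≠ b.1 := fun hh => hab (hinj a ha b hb hh)
    rcases lt_trichotomy a.1 b.1 with hlt | heq | hgt
    · simp [hlt, le_of_lt hlt]
    · exact absurd heq h1
    · simp [hgt, not_lt_of_gt hgt, lt_asymm hgt]

theorem sorted_pairs_eq (l : List String) (v : String → Int) :
    PySem.List.sorted ((PySem.Set.ofList l).map (fun k => (k, v k))) Prod.fst false
      = (PySem.List.sorted (PySem.Set.ofList l) (fun k => k) false).map (fun k => (k, v k)) := by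
  apply PySem.List.sorted_eq_of_perm_of_pairwise_lt
  · exact List.Perm.map _ (PySem.List.sorted_perm _ _ _)
  · rw [List.pairwise_map]
    exact (PySem.List.sorted_ofList_pairwise_lt (xs := l)).imp (fun h => h)

-- the C-table fold: fresh distinct keys appended with the running sum
theorem ctfold (K : List String) (v : String → Int) : ∀ (d : PySem.Dict String Int) (s : Int),
    (∀ c ∈ K, d.contains c = false) → K.Nodup →
    ((K.foldl (fun (st : PySem.Dict String Int × Int) ch => (st.1.insert ch st.2, st.2 + v ch)) (d, s)).1).items
      = d.items ++ ctabL K v s := by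
  induction K with
  | nil => intro d s _ _; simp [ctabL]
  | cons c t ih =>
    intro d s hfresh hnd
    have hc : d.contains c = false := hfresh c (by simp)
    have hfresh' : ∀ c' ∈ t, (d.insert c s).contains c' = false := by
      intro c' hc'
      rw [PySem.Dict.contains_insert]
      have hne : c' ≠ c := fun h => (List.nodup_cons.mp hnd).1 (h ▸ hc')
      simp [hne, hfresh c' (by simp [hc'])]
    rw [List.foldl_cons, ih _ _ hfresh' (List.nodup_cons.mp hnd).2,
        PySem.Dict.items_insert_of_not_contains d s hc]
    simp [ctabL]

-- B-SIDE -------------------------------------------------------------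

-- positions[c] is the list of indices of c, via the library characterisation of the grouping fold
theorem positions_getD (cs : List String) (c : String) :
    ((PySem.List.enumerate cs 0).foldl
        (fun (d : PySem.Dict String (List Int)) p => d.modify p.2 [] (fun l => l ++ [p.1]))
        PySem.Dict.empty).getD c []
      = (((PySem.List.enumerate cs 0).filter (fun q => q.2 == c)).map (fun q => q.1)) := by
  have hswap : (PySem.List.enumerate cs 0).foldl
      (fun (d : PySem.Dict String (List Int)) p => d.modify p.2 [] (fun l => l ++ [p.1]))
      PySem.Dict.empty
    = ((PySem.List.enumerate cs 0).map Prod.swap).foldl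
      (fun (d : PySem.Dict String (List Int)) p => d.modify p.1 [] (fun l => l ++ [p.2]))
      PySem.Dict.empty := by
    rw [List.foldl_map]
    rfl
  rw [hswap, PySem.Dict.getD_foldl_modify_append]
  rw [List.filter_map]
  simp [List.map_map, Function.comp_def]

theorem occ_getElem? (l : List String) : ∀ (s : Int) (c : String) (j : Nat) (p : Int),
    ((((PySem.List.enumerate l s).filter (fun q => q.2 == c)).map (fun q => q.1)))[j]? = some p →
    ∃ k : Nat, k < l.length ∧ p = s + k ∧ l[k]? = some c ∧ (l.take k).count c = j := by
  induction l with
  | nil => intro s c j p h; simp [PySem.List.enumerate] at h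
  | cons x t ih =>
    intro s c j p h
    rw [PySem.List.enumerate_cons, List.filter_cons] at h
    by_cases hx : (x == c) = true
    · have hxc : x = c := by simpa using hx
      simp only [hx, if_true] at h
      match j with
      | 0 =>
        simp only [List.map_cons, List.getElem?_cons_zero, Option.some.injEq] at h
        exact ⟨0, by simp, by omega, by simp [hxc], by simp⟩
      | j + 1 =>
        simp only [List.map_cons, List.getElem?_cons_succ] at h
        obtain ⟨k, hk, hp, hgc, hcnt⟩ := ih (s + 1) c j p h
        refine ⟨k + 1, by simp only [List.length_cons]; omega, by push_cast; omega, by simpa using hgc, ?_⟩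
        simp [List.count_cons, hx, hcnt]
    · simp only [hx, Bool.false_eq_true, if_false] at h
      obtain ⟨k, hk, hp, hgc, hcnt⟩ := ih (s + 1) c j p h
      refine ⟨k + 1, by simp only [List.length_cons]; omega, by push_cast; omega, by simpa using hgc, ?_⟩
      simp [List.count_cons, hx, hcnt]

theorem occ_mem (l : List String) : ∀ (s : Int) (c : String) (k : Nat), k < l.length → l[k]? = some c →
    (s + k) ∈ (((PySem.List.enumerate l s).filter (fun q => q.2 == c)).map (fun q => q.1)) := by
  induction l with
  | nil => intro s c k hk _; simp at hk
  | cons x t ih =>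
    intro s c k hk hgc
    rw [PySem.List.enumerate_cons, List.filter_cons]
    match k with
    | 0 =>
      have hxc : x = c := by simpa using hgc
      simp [hxc]
    | k + 1 =>
      have hmem := ih (s + 1) c k (by simp only [List.length_cons] at hk; omega) (by simpa using hgc)
      have harith : s + (↑(k + 1) : Int) = (s + 1) + ↑k := by push_cast; omega
      by_cases hx : (x == c) = true
      · simp only [hx, if_true, List.map_cons, List.mem_cons]
        right
        rw [harith]
        exact hmem
      · simp only [hx, Bool.false_eq_true, if_false]
        rw [harith]
        exact hmem

theorem occ_length (l : List String) : ∀ (s : Int) (c : String),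
    ((((PySem.List.enumerate l s).filter (fun q => q.2 == c)).map (fun q => q.1))).length = l.count c := by
  induction l with
  | nil => intro s c; simp [PySem.List.enumerate]
  | cons x t ih =>
    intro s c
    rw [PySem.List.enumerate_cons, List.filter_cons]
    by_cases hx : (x == c) = true
    · simp [hx, ih (s + 1) c, List.count_cons]
    · simp [hx, ih (s + 1) c, List.count_cons]

theorem scatter_length (W : List (Int × Int)) : ∀ (a : List Int),
    (W.foldl (fun a q => PySem.List.pySetD a q.2 q.1) a).length = a.length := by
  induction W with
  | nil => intro a; simp
  | cons q t ih => intro a; rw [List.foldl_cons, ih, PySem.List.length_pySetD]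

-- MAIN ---------------------------------------------------------------

-- the grouping dict of port B
def posFold (cs : List String) : PySem.Dict String (List Int) :=
  (PySem.List.enumerate cs 0).foldl
    (fun (d : PySem.Dict String (List Int)) p => d.modify p.2 [] (fun l => l ++ [p.1]))
    PySem.Dict.empty

theorem afold0 (cs : List String) :
    cs.foldl cumulStepA (PySem.Dict.empty, []) =
      (cs.foldl cumulStepD PySem.Dict.empty, ranksA [] cs) := by
  simpa using afold cs [] PySem.Dict.empty [] (fun c => by simp)

theorem akeys (cs : List String) :
    (cs.foldl cumulStepD PySem.Dict.empty).keys = PySem.Set.ofList cs := by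
  rw [dfold_keys, PySem.Dict.keys_empty, PySem.Set.ofList_eq_foldl]
  rfl

theorem aitems (cs : List String) :
    (cs.foldl cumulStepD PySem.Dict.empty).items
      = (PySem.Set.ofList cs).map (fun k => (k, (cs.count k : Int))) := by
  have hnd : (cs.foldl cumulStepD PySem.Dict.empty).keys.Nodup := by
    rw [akeys]; exact PySem.Set.nodup_ofList cs
  rw [PySem.Dict.items_eq_map_keys _ hnd 0, akeys]
  refine List.map_congr_left (fun k _ => ?_)
  rw [dfold_getD, PySem.Dict.getD_empty]
  simp

theorem actab (cs : List String) :
    (generate_C_table (cs.foldl cumulStepD PySem.Dict.empty)).items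
      = ctabL (PySem.List.sorted (PySem.Set.ofList cs) (fun k => k) false)
          (fun c => (cs.count c : Int)) 0 := by
  unfold generate_C_table
  rw [aitems]
  have hndf : (((PySem.Set.ofList cs).map (fun k => (k, (cs.count k : Int)))).map Prod.fst).Nodup := by
    simpa [List.map_map, Function.comp_def] using PySem.Set.nodup_ofList cs
  rw [sorted2_eq_sorted_fst _ hndf, sorted_pairs_eq, List.foldl_map]
  have hnd : (PySem.List.sorted (PySem.Set.ofList cs) (fun k => k) false).Nodup :=
    ((PySem.List.sorted_perm (PySem.Set.ofList cs) (fun k => k) false).nodup_iff).mpr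
      (PySem.Set.nodup_ofList cs)
  have h := ctfold (PySem.List.sorted (PySem.Set.ofList cs) (fun k => k) false)
      (fun c => (cs.count c : Int)) PySem.Dict.empty 0
      (fun c _ => PySem.Dict.contains_empty c) hnd
  simpa using h

-- B-side assembly
theorem bkeys (cs : List String) : (posFold cs).keys = PySem.Set.ofList cs := by
  unfold posFold
  have h := PySem.Dict.keys_foldl_modify_key (PySem.List.enumerate cs 0)
      (fun p => p.2) [] (fun _ p => fun l => l ++ [p.1]) PySem.Dict.empty
  simp only [PySem.Dict.keys_empty] at h
  rw [h, PySem.List.map_snd_enumerate, PySem.Set.ofList_eq_foldl]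
  rfl

theorem bkeys_nodup (cs : List String) : (posFold cs).keys.Nodup := by
  rw [bkeys]; exact PySem.Set.nodup_ofList cs

theorem bgetD (cs : List String) (c : String) :
    (posFold cs).getD c []
      = ((PySem.List.enumerate cs 0).filter (fun q => q.2 == c)).map (fun q => q.1) := by
  unfold posFold
  exact positions_getD cs c

theorem bposlen (cs : List String) (c : String) :
    ((posFold cs).getD c []).length = cs.count c := by
  rw [bgetD, occ_length]

theorem getD_set_lt (a : List Int) (k : Nat) (v : Int) (j : Nat) (hk : k < a.length) :
    (a.set k v).getD j 0 = if k = j then v else a.getD j 0 := by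
  by_cases h : k = j
  · subst h
    rw [List.getD_eq_getElem?_getD, List.getElem?_set_self (by simpa using hk)]
    simp
  · rw [List.getD_eq_getElem?_getD, List.getElem?_set_ne h, ← List.getD_eq_getElem?_getD]
    simp [h]

theorem scatterD (cs : List String) (W : List (Int × Int)) : ∀ (a : List Int),
    a.length = cs.length →
    (∀ q ∈ W, ∃ k : Nat, q.2 = (k : Int) ∧ k < cs.length ∧ q.1 = specv cs k) →
    ∀ (j : Nat),
      (W.foldl (fun a q => PySem.List.pySetD a q.2 q.1) a).getD j 0
        = if (∃ q ∈ W, q.2 = (j : Int)) then specv cs j else a.getD j 0 := by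
  induction W with
  | nil =>
    intro a _ _ j
    simp
  | cons q t ih =>
    intro a ha hW j
    obtain ⟨k, hq2, hk, hq1⟩ := hW q (by simp)
    have hset : PySem.List.pySetD a q.2 q.1 = a.set k (specv cs k) := by
      rw [PySem.List.pySetD_of_nonneg a q.1 (by rw [hq2]; exact Int.natCast_nonneg k), hq2, hq1]
      simp
    have ha' : (a.set k (specv cs k)).length = cs.length := by simp [ha]
    rw [List.foldl_cons, hset, ih _ ha' (fun q' hq' => hW q' (by simp [hq'])) j]
    by_cases h1 : ∃ q' ∈ t, q'.2 = (j : Int)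
    · have h2 : ∃ q' ∈ q :: t, q'.2 = (j : Int) := by
        obtain ⟨q', hq', he⟩ := h1
        exact ⟨q', by simp [hq'], he⟩
      simp [h1, h2]
    · by_cases h2 : k = j
      · subst h2
        have h3 : ∃ q' ∈ q :: t, q'.2 = (k : Int) := ⟨q, by simp, hq2⟩
        rw [if_neg h1, if_pos h3, getD_set_lt a k _ k (by omega), if_pos rfl]
      · have h3 : ¬ ∃ q' ∈ q :: t, q'.2 = (j : Int) := by
          rintro ⟨q', hq', he⟩
          rcases List.mem_cons.mp hq' with rfl | hmem
          · rw [hq2] at he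
            exact h2 (by exact_mod_cast he)
          · exact h1 ⟨q', hmem, he⟩
        rw [if_neg h1, if_neg h3, getD_set_lt a k _ j (by omega), if_neg h2]

theorem branks (cs : List String) :
    (posFold cs).values.foldl
      (fun (a : List Int) pos_list =>
        (PySem.List.enumerate pos_list 0).foldl (fun a q => PySem.List.pySetD a q.2 q.1) a)
      (List.replicate cs.length (0 : Int)) = ranksA [] cs := by
  rw [PySem.Dict.values_eq_map_keys (posFold cs) (bkeys_nodup cs) [], bkeys cs]
  rw [List.foldl_map]
  simp only [bgetD]
  rw [← List.foldl_map (f := fun c => PySem.List.enumerate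
        (((PySem.List.enumerate cs 0).filter (fun q => q.2 == c)).map (fun q => q.1)) 0)
      (g := fun (a : List Int) xs => xs.foldl (fun a (q : Int × Int) => PySem.List.pySetD a q.2 q.1) a),
    ← List.foldl_flatten]
  have hW : ∀ q ∈ ((PySem.Set.ofList cs).map (fun c => PySem.List.enumerate
        (((PySem.List.enumerate cs 0).filter (fun q => q.2 == c)).map (fun q => q.1)) 0)).flatten,
      ∃ k : Nat, q.2 = (k : Int) ∧ k < cs.length ∧ q.1 = specv cs k := by
    intro q hq
    rw [List.mem_flatten] at hq
    obtain ⟨l0, hl0, hql⟩ := hq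
    rw [List.mem_map] at hl0
    obtain ⟨c, _, rfl⟩ := hl0
    rw [PySem.List.mem_enumerate_iff] at hql
    obtain ⟨jj, hjj, rfl⟩ := hql
    have hjq := List.getElem?_eq_getElem hjj
    obtain ⟨k, hk, hp, hgc, hcnt⟩ := occ_getElem? cs 0 c jj _ hjq
    refine ⟨k, by simp [hp], hk, ?_⟩
    have hgd : cs.getD k "" = c := by
      rw [List.getD_eq_getElem?_getD, hgc]
      rfl
    show (0 : Int) + (jj : Int) = specv cs k
    unfold specv
    rw [hgd, hcnt]
    simp
  have hwr : ∀ j : Nat, j < cs.length →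
      ∃ q ∈ ((PySem.Set.ofList cs).map (fun c => PySem.List.enumerate
        (((PySem.List.enumerate cs 0).filter (fun q => q.2 == c)).map (fun q => q.1)) 0)).flatten,
      q.2 = (j : Int) := by
    intro j hj
    have hcs : cs[j]? = some (cs.getD j "") := by
      rw [List.getD_eq_getElem?_getD, List.getElem?_eq_getElem hj]
      rfl
    have hmemc : cs.getD j "" ∈ PySem.Set.ofList cs := by
      rw [PySem.Set.mem_ofList]
      have := List.getElem_mem hj
      rw [List.getD_eq_getElem?_getD, List.getElem?_eq_getElem hj] at hcs ⊢
      simpa [List.getD_eq_getElem?_getD, List.getElem?_eq_getElem hj] using this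
    have hoccm := occ_mem cs 0 (cs.getD j "") j hj hcs
    rw [List.mem_iff_getElem?] at hoccm
    obtain ⟨i, hi⟩ := hoccm
    obtain ⟨hilt, hieq⟩ := List.getElem?_eq_some_iff.mp hi
    refine ⟨(0 + (i : Int), (0 : Int) + j), ?_, by simp⟩
    rw [List.mem_flatten]
    refine ⟨_, List.mem_map_of_mem hmemc, ?_⟩
    rw [PySem.List.mem_enumerate_iff]
    exact ⟨i, hilt, by rw [hieq]⟩
  apply List.ext_getElem
  · rw [scatter_length, List.length_replicate, ranksA_length]
  · intro j hj1 hj2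
    have hjc : j < cs.length := by rwa [ranksA_length] at hj2
    have hlhs : (((PySem.Set.ofList cs).map (fun c => PySem.List.enumerate
          (((PySem.List.enumerate cs 0).filter (fun q => q.2 == c)).map (fun q => q.1)) 0)).flatten.foldl
            (fun a q => PySem.List.pySetD a q.2 q.1) (List.replicate cs.length (0 : Int))).getD j 0
        = specv cs j := by
      rw [scatterD cs _ (List.replicate cs.length (0 : Int)) (by simp) hW j, if_pos (hwr j hjc)]
    rw [← List.getD_eq_getElem (d := 0) _ hj1, hlhs]
    have hra := ranksA_getElem cs [] j (by simpa using hjc)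
    simp only [List.nil_append, List.length_nil, Nat.zero_add] at hra
    rw [hra]
    rfl

theorem bctab (cs : List String) :
    ((PySem.List.sorted (posFold cs).keys (fun k => k) false).foldl
        (fun (st : PySem.Dict String Int × Int) ch =>
          (st.1.insert ch st.2, st.2 + (((posFold cs).getD ch []).length : Int)))
        (PySem.Dict.empty, 0)).1.items
      = ctabL (PySem.List.sorted (PySem.Set.ofList cs) (fun k => k) false)
          (fun c => (cs.count c : Int)) 0 := by
  rw [bkeys]
  have hnd : (PySem.List.sorted (PySem.Set.ofList cs) (fun k => k) false).Nodup :=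
    ((PySem.List.sorted_perm (PySem.Set.ofList cs) (fun k => k) false).nodup_iff).mpr
      (PySem.Set.nodup_ofList cs)
  have hfun : (fun (st : PySem.Dict String Int × Int) ch =>
        (st.1.insert ch st.2, st.2 + (((posFold cs).getD ch []).length : Int)))
      = (fun (st : PySem.Dict String Int × Int) ch =>
        (st.1.insert ch st.2, st.2 + (cs.count ch : Int))) := by
    funext st ch
    rw [bposlen]
  rw [hfun]
  have h := ctfold (PySem.List.sorted (PySem.Set.ofList cs) (fun k => k) false)
      (fun c => (cs.count c : Int)) PySem.Dict.empty 0
      (fun c _ => PySem.Dict.contains_empty c) hnd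
  simpa using h

theorem main_eq (bwt_string : String) : cumul_count bwt_string = cumul_count_alt bwt_string := by
  simp only [cumul_count, cumul_count_alt]
  set cs := bwt_string.toList.map (fun c => String.ofList [c]) with hcs
  have hpos : (PySem.List.enumerate cs 0).foldl
      (fun (d : PySem.Dict String (List Int)) p => d.modify p.2 [] (fun l => l ++ [p.1]))
      PySem.Dict.empty = posFold cs := rfl
  rw [hpos, afold0]
  have hrep : PySem.List.pyRepeat [(0 : Int)] (PySem.Str.len bwt_string)
      = List.replicate cs.length (0 : Int) := by
    rw [PySem.List.pyRepeat_singleton]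
    congr 1
    rw [PySem.Str.len_eq]
    simp [hcs]
  rw [hrep]
  refine Prod.ext ?_ ?_
  · show ranksA [] cs = _
    rw [branks]
  · show (generate_C_table (cs.foldl cumulStepD PySem.Dict.empty)).items = _
    rw [actab, bctab]

-- ===== VERDICT (by name: the statement is the Claim_ definition above) =====
theorem cumul_count_spec : Claim_equal_cumul_count := by
  intro s _
  unfold Spec_cumul_count
  exact main_eq s
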